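-- pv_equiv track=rewrite | github.com/Aarize29/nlp-prgms | nlp_prgrms.py | determine_sentiment_label
-- ===== SOURCE A (Python) =====
-- training_corpus = [
--     ("I love this product", "positive"),
--     ("This is excellent", "positive"),
--     ("Terrible service", "negative"),
--     ("It's okay, not great", "neutral"),
--     ("Amazing experience", "positive"),
--     ("Disappointing outcome", "negative"),
--     ("Neutral feelings", "neutral"),
--     ("I dislike it", "negative")
-- ]
--
-- def determine_sentiment_label(text):
--     # Check using predefined keywords
--     if "love" in text.lower():
--         return 'positive'
--     elif "terrible" in text.lower():
--         return 'negative'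
--     else:
--         # Check using the training corpus
--         for corpus_text, label in training_corpus:
--             if corpus_text.lower() in text.lower():
--                 return label
--         # Default to neutral if no match found
--         return 'neutral'
-- ===== SOURCE B (Python) =====
-- training_corpus = [
--     ("I love this product", "positive"),
--     ("This is excellent", "positive"),
--     ("Terrible service", "negative"),
--     ("It's okay, not great", "neutral"),
--     ("Amazing experience", "positive"),
--     ("Disappointing outcome", "negative"),
--     ("Neutral feelings", "neutral"),
--     ("I dislike it", "negative")
-- ]
--
-- _RULES = [("love", "positive"), ("terrible", "negative")] + training_corpus
--
-- def determine_sentiment_label(text):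
--     # Backward overwrite fold: visit rules from lowest to highest priority,
--     # overwriting the accumulator on each match; the last overwrite (the
--     # highest-priority matching rule) wins, 'neutral' if nothing matched.
--     lower = text.lower()
--     label = 'neutral'
--     for sub, lab in reversed(_RULES):
--         if sub.lower() in lower:
--             label = lab
--     return label
-- ===== Notes on version B (the rewrite author's own statement) =====
-- stated objective: alternative
-- what changed: Replaced A's if/elif guards plus forward corpus loop with early return by a single backward fold over a unified rules table: an accumulator starts at the default label and is overwritten at every matching rule, visiting rules in reverse priority order so the final overwrite is the highest-priority match.
import Mathlib
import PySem

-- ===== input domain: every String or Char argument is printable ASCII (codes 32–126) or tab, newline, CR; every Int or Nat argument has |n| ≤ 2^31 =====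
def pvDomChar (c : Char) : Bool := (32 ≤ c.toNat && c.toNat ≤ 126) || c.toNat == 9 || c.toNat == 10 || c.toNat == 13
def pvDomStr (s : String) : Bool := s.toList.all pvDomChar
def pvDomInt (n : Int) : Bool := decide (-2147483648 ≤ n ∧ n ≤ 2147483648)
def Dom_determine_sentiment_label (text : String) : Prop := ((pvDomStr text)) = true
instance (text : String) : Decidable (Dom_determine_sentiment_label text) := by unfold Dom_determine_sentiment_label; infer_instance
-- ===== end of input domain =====

-- B replaces A's if/elif guards + early-return corpus loop by one backward overwrite fold
-- over a unified rules table (last overwrite = highest-priority match); objective: alternative.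

-- ===== PORT A =====
def training_corpus : List (String × String) :=
  [("I love this product", "positive"),
   ("This is excellent", "positive"),
   ("Terrible service", "negative"),
   ("It's okay, not great", "neutral"),
   ("Amazing experience", "positive"),
   ("Disappointing outcome", "negative"),
   ("Neutral feelings", "neutral"),
   ("I dislike it", "negative")]

-- the 'for corpus_text, label in training_corpus' loop, returning at the first match
def corpusLoop (text : String) : List (String × String) → String
  | [] => "neutral"
  | (corpus_text, label) :: rest =>
      if PySem.Str.isIn (PySem.Str.lower corpus_text) (PySem.Str.lower text) then label
      else corpusLoop text rest

def determine_sentiment_label (text : String) : String :=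
  if PySem.Str.isIn "love" (PySem.Str.lower text) then "positive"
  else if PySem.Str.isIn "terrible" (PySem.Str.lower text) then "negative"
  else corpusLoop text training_corpus

-- ===== PORT B =====
def pvRules : List (String × String) :=
  [("love", "positive"), ("terrible", "negative")] ++ training_corpus

def determine_sentiment_label_alt (text : String) : String :=
  let lower := PySem.Str.lower text
  pvRules.reverse.foldl
    (fun label p => if PySem.Str.isIn (PySem.Str.lower p.1) lower then p.2 else label)
    "neutral"

-- ===== PRECONDITION & SPEC =====
def Spec_determine_sentiment_label (text : String) (out : String) : Prop := out = determine_sentiment_label_alt text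
instance (text : String) (out : String) : Decidable (Spec_determine_sentiment_label text out) := by unfold Spec_determine_sentiment_label; infer_instance

-- ===== CLAIM (what is proved, stated in full; the proofs are below) =====
def Claim_equal_determine_sentiment_label : Prop := ∀ (text : String), Dom_determine_sentiment_label text → Spec_determine_sentiment_label text (determine_sentiment_label text)

-- ===== LEMMAS AND PROOFS =====

-- B's backward overwrite fold over a rules list is the forward first-match loop
lemma revFold_eq_corpusLoop (text : String) (l : List (String × String)) :
    l.reverse.foldl
      (fun label p => if PySem.Str.isIn (PySem.Str.lower p.1) (PySem.Str.lower text) then p.2 else label)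
      "neutral" = corpusLoop text l := by
  rw [List.foldl_reverse]
  induction l with
  | nil => rfl
  | cons p rest ih =>
      obtain ⟨s, lab⟩ := p
      simp only [List.foldr_cons, corpusLoop, ih]

-- ===== VERDICT (by name: the statement is the Claim_ definition above) =====
theorem determine_sentiment_label_spec : Claim_equal_determine_sentiment_label := by
  intro text _
  unfold Spec_determine_sentiment_label determine_sentiment_label determine_sentiment_label_alt pvRules
  simp only []
  rw [revFold_eq_corpusLoop text ([("love", "positive"), ("terrible", "negative")] ++ training_corpus)]
  have hlove : PySem.Str.lower "love" = "love" := by decide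
  have hterr : PySem.Str.lower "terrible" = "terrible" := by decide
  simp only [List.cons_append, List.nil_append, corpusLoop, hlove, hterr]
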